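-- pv_equiv track=rewrite | github.com/willybc/Programacion-Python | 11/comparaciones_ordenamiento.py | buscar_max
-- ===== SOURCE A (Python) =====
-- def buscar_max(lista, ini, fin):
--     contador = 0
--     pos_max = ini
--     for i in range( ini+1, fin+1 ):
--         contador += 1
--
--         if lista[i] > lista[pos_max]:
--             pos_max = i
--
--     return pos_max, contador
-- ===== SOURCE B (Python) =====
-- def buscar_max(lista, ini, fin):
--     # Divide-and-conquer tournament argmax (left winner keeps ties -> first
--     # maximal index, same as A's strict '>'); comparison count is the closed
--     # form fin - ini.
--     if fin <= ini:
--         return ini, 0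
--     return _argmax(lista, ini, fin), fin - ini
--
-- def _argmax(lista, lo, hi):
--     # first index of the maximum of lista[lo..hi]
--     if lo == hi:
--         return lo
--     mid = (lo + hi) // 2
--     l = _argmax(lista, lo, mid)
--     r = _argmax(lista, mid + 1, hi)
--     return l if lista[l] >= lista[r] else r
-- ===== Notes on version B (the rewrite author's own statement) =====
-- stated objective: alternative
-- what changed: Replaces A's single fused left-to-right scan with an incremented counter by a recursive divide-and-conquer tournament over the index range (left winner keeps ties, so the first maximal index is preserved) plus the closed-form comparison count fin - ini.
import Mathlib
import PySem

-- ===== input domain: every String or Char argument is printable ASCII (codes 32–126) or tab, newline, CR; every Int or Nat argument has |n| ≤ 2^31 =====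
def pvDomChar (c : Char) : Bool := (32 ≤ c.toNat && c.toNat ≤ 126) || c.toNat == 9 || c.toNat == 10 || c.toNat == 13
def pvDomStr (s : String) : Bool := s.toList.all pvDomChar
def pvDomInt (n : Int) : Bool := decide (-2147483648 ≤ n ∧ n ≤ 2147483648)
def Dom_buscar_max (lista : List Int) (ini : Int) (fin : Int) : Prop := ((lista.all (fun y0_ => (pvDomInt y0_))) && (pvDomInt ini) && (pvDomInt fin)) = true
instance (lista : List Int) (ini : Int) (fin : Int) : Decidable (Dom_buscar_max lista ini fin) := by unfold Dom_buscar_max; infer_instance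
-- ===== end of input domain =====

-- B replaces A's fused counting scan by a recursive divide-and-conquer tournament
-- argmax (left wins ties, preserving the first maximal index) plus the closed-form
-- comparison count fin - ini.

-- ===== PORT A =====
-- A: fused loop over range(ini+1, fin+1) carrying (pos_max, contador).
def buscar_max (lista : List Int) (ini : Int) (fin : Int) : Int × Int :=
  (PySem.List.pyRange (ini + 1) (fin + 1) 1).foldl
    (fun (st : Int × Int) i =>
      let contador := st.2 + 1
      if PySem.List.pyGetD lista i 0 > PySem.List.pyGetD lista st.1 0 then (i, contador)
      else (st.1, contador))
    (ini, 0)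

-- ===== PORT B =====
-- _argmax: first index of the maximum of lista[lo..hi], by halving the range.
-- (Python tests 'lo == hi'; the guard 'hi ≤ lo' is identical on every reachable
-- call (lo ≤ hi) and only makes the same recursion total.)
def pvArgmax (lista : List Int) (lo hi : Int) : Int :=
  if h : hi ≤ lo then lo
  else
    let mid := PySem.Int.floordiv (lo + hi) 2
    let l := pvArgmax lista lo mid
    let r := pvArgmax lista (mid + 1) hi
    if PySem.List.pyGetD lista l 0 ≥ PySem.List.pyGetD lista r 0 then l else r
termination_by (hi - lo).toNat
decreasing_by
  · have h2 : PySem.Int.floordiv (lo + hi) 2 < hi :=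
      (PySem.Int.floordiv_lt_iff_lt_mul (by omega)).mpr (by omega)
    omega
  · have h1 : lo ≤ PySem.Int.floordiv (lo + hi) 2 :=
      (PySem.Int.le_floordiv_iff_mul_le (by omega)).mpr (by omega)
    omega

-- B: empty-range guard, then tournament argmax and count fin - ini.
def buscar_max_alt (lista : List Int) (ini : Int) (fin : Int) : Int × Int :=
  if fin ≤ ini then (ini, 0)
  else (pvArgmax lista ini fin, fin - ini)

-- ===== PRECONDITION & SPEC =====
-- Pre_ excludes exactly the inputs where A raises IndexError: a nonempty loop
-- whose index range [ini, fin] leaves the valid Python index range of lista.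
def Pre_buscar_max (lista : List Int) (ini : Int) (fin : Int) : Prop :=
  fin ≤ ini ∨ (-(lista.length : Int) ≤ ini ∧ fin < (lista.length : Int))
instance (lista : List Int) (ini : Int) (fin : Int) : Decidable (Pre_buscar_max lista ini fin) := by
  unfold Pre_buscar_max; infer_instance
def pvWitness_buscar_max : List Int × Int × Int := ([3, 1, 4, 1, 5], 0, 4)

def Spec_buscar_max (lista : List Int) (ini : Int) (fin : Int) (out : Int × Int) : Prop := out = buscar_max_alt lista ini fin
instance (lista : List Int) (ini : Int) (fin : Int) (out : Int × Int) : Decidable (Spec_buscar_max lista ini fin out) := by unfold Spec_buscar_max; infer_instance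

-- ===== CLAIM (what is proved, stated in full; the proofs are below) =====
def Claim_equal_buscar_max : Prop := ∀ (lista : List Int) (ini : Int) (fin : Int), Dom_buscar_max lista ini fin → Pre_buscar_max lista ini fin → Spec_buscar_max lista ini fin (buscar_max lista ini fin)

-- ===== LEMMAS AND PROOFS =====

-- A's step function with the counter erased: the running first-argmax.
def pvStep (lista : List Int) : Int → Int → Int :=
  fun p i => if PySem.List.pyGetD lista i 0 > PySem.List.pyGetD lista p 0 then i else p

-- A's fold splits into the key-only running argmax and the iteration count.
theorem pvFoldSplit (lista : List Int) (l : List Int) (pos c : Int) :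
    l.foldl
      (fun (st : Int × Int) i =>
        let contador := st.2 + 1
        if PySem.List.pyGetD lista i 0 > PySem.List.pyGetD lista st.1 0 then (i, contador)
        else (st.1, contador)) (pos, c)
    = (l.foldl (pvStep lista) pos, c + l.length) := by
  induction l generalizing pos c with
  | nil => simp
  | cons x t ih =>
    simp only [List.foldl_cons, List.length_cons, pvStep]
    split_ifs with h <;>
      · rw [ih, Prod.mk.injEq]
        refine ⟨by simp, by push_cast; omega⟩

-- Re-seeding the running argmax: folding from the combined seed equals
-- combining the seed with the fold's own result.
theorem pvReseed (lista : List Int) (t : List Int) (x L : Int) :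
    t.foldl (pvStep lista) (pvStep lista L x)
    = pvStep lista L (t.foldl (pvStep lista) x) := by
  induction t generalizing x L with
  | nil => simp
  | cons y s ih =>
    simp only [List.foldl_cons]
    have hx : pvStep lista (pvStep lista L x) y
        = pvStep lista L (pvStep lista x y) ∨
        s.foldl (pvStep lista) (pvStep lista (pvStep lista L x) y)
        = pvStep lista L (s.foldl (pvStep lista) (pvStep lista x y)) := by
      left
      simp only [pvStep]
      split_ifs <;> first | rfl | omega
    rcases hx with hx | hx
    · rw [hx, ih]
    · exact hx

-- The tournament argmax equals A's running argmax over range(lo+1, hi+1).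
theorem pvArgmaxEq (lista : List Int) (lo hi : Int) (h : lo ≤ hi) :
    pvArgmax lista lo hi
    = (PySem.List.pyRange (lo + 1) (hi + 1) 1).foldl (pvStep lista) lo := by
  by_cases heq : hi ≤ lo
  · rw [pvArgmax, dif_pos heq, PySem.List.pyRange_one_eq_nil (by omega), List.foldl_nil]
  · have hlt : lo < hi := by omega
    have h1 : lo ≤ PySem.Int.floordiv (lo + hi) 2 :=
      (PySem.Int.le_floordiv_iff_mul_le (by omega)).mpr (by omega)
    have h2 : PySem.Int.floordiv (lo + hi) 2 < hi :=
      (PySem.Int.floordiv_lt_iff_lt_mul (by omega)).mpr (by omega)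
    rw [pvArgmax, dif_neg heq]
    simp only
    set mid := PySem.Int.floordiv (lo + hi) 2 with hmid
    rw [pvArgmaxEq lista lo mid h1, pvArgmaxEq lista (mid + 1) hi (by omega),
        PySem.List.pyRange_one_append (lo + 1) (mid + 1) (hi + 1) (by omega) (by omega),
        List.foldl_append,
        PySem.List.pyRange_one_cons (show mid + 1 < hi + 1 by omega)]
    rw [List.foldl_cons, pvReseed]
    simp only [pvStep]
    split_ifs <;> first | rfl | omega
termination_by (hi - lo).toNat
decreasing_by all_goals omega

-- ===== VERDICT (by name: the statement is the Claim_ definition above) =====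
theorem buscar_max_spec : Claim_equal_buscar_max := by
  intro lista ini fin _ _
  unfold Spec_buscar_max buscar_max buscar_max_alt
  by_cases h : fin ≤ ini
  · rw [PySem.List.pyRange_one_eq_nil (by omega)]
    simp [h]
  · rw [if_neg h, pvFoldSplit, pvArgmaxEq lista ini fin (by omega), Prod.mk.injEq]
    refine ⟨rfl, ?_⟩
    rw [PySem.List.length_pyRange_one]
    omega
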